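-- pv_equiv track=rewrite | github.com/GundalaNikhil/DSA | regenerate_greedy_tests.py | solve_grd015
-- ===== SOURCE A (Python) =====
-- def solve_grd015(k, t, batches):
--     f = {}; res = []
--     for b in batches:
--         for x in b: f[x] = f.get(x, 0) + 1
--         v = []
--         for x, c in f.items():
--             if c <= t: v.extend([x] * c)
--         if not v: res.append("NA")
--         else:
--             v.sort(); nv = len(v)
--             if nv % 2 == 1: res.append(str(v[nv // 2]))
--             else: res.append(str((v[nv // 2 - 1] + v[nv // 2]) // 2))
--     return " ".join(res)
-- ===== SOURCE B (Python) =====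
-- def solve_grd015(k, t, batches):
--     # Same running counts, but the median is found by scanning sorted distinct
--     # keys with cumulative counts instead of materializing and sorting the
--     # whole multiset each batch.
--     f = {}
--     res = []
--     for b in batches:
--         for x in b:
--             f[x] = f.get(x, 0) + 1
--         keys = sorted(x for x in f if f[x] <= t)
--         n = sum(f[x] for x in keys)
--         if n == 0:
--             res.append("NA")
--         else:
--             lo = (n - 1) // 2
--             hi = n // 2
--             acc = 0
--             a = None
--             for x in keys:
--                 acc += f[x]
--                 if a is None and acc > lo:
--                     a = x
--                 if acc > hi:
--                     res.append(str(x) if n % 2 == 1 else str((a + x) // 2))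
--                     break
--     return " ".join(res)
-- ===== Notes on version B (the rewrite author's own statement) =====
-- stated objective: faster
-- what changed: Instead of materializing the whole eligible multiset and sorting it every batch, B sorts only the distinct keys and finds the median by a single cumulative-count scan.
import Mathlib
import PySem

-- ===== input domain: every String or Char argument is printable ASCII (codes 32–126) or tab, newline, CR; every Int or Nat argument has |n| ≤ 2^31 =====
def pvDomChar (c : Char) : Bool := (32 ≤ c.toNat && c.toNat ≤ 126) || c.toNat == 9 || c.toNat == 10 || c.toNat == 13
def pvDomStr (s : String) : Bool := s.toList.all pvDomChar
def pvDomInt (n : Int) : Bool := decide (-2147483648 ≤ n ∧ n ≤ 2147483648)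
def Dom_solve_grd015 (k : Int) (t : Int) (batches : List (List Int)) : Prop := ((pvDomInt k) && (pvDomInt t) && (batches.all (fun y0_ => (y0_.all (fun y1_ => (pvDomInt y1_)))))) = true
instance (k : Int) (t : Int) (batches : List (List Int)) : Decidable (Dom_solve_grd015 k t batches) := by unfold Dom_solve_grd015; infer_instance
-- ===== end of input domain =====

-- B replaces A's per-batch "materialize the eligible multiset and sort it" median by
-- sorting only the distinct keys and locating the median ranks with one cumulative-count
-- scan; the running count dictionary is built the same way in both (no argument is mutated).

-- ===== PORT A =====
-- for x in b: f[x] = f.get(x, 0) + 1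
def pvA_updateCounts (f : PySem.Dict Int Int) (b : List Int) : PySem.Dict Int Int :=
  b.foldl (fun f x => f.insert x (f.getD x 0 + 1)) f

-- one iteration of A's outer loop: state (f, res) and the batch b
def pvA_batch (t : Int) (f : PySem.Dict Int Int) (res : List String) (b : List Int) :
    PySem.Dict Int Int × List String :=
  let f := pvA_updateCounts f b
  -- v = []; for x, c in f.items(): if c <= t: v.extend([x] * c)
  let v := f.items.foldl (fun acc p => if p.2 ≤ t then acc ++ List.replicate p.2.toNat p.1 else acc) []
  if v = [] then (f, res ++ ["NA"])
  else
    let v := PySem.List.sorted v (fun x => x) false   -- v.sort()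
    let nv : Int := v.length
    if PySem.Int.mod nv 2 = 1 then
      (f, res ++ [PySem.Int.toStr (PySem.List.pyGetD v (PySem.Int.floordiv nv 2) 0)])
    else
      (f, res ++ [PySem.Int.toStr (PySem.Int.floordiv
        (PySem.List.pyGetD v (PySem.Int.floordiv nv 2 - 1) 0 + PySem.List.pyGetD v (PySem.Int.floordiv nv 2) 0) 2)])

def solve_grd015 (k : Int) (t : Int) (batches : List (List Int)) : String :=
  let st := batches.foldl (fun st b => pvA_batch t st.1 st.2 b) (PySem.Dict.empty, [])
  PySem.Str.join " " st.2

-- ===== PORT B =====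
-- for x in b: f[x] = f.get(x, 0) + 1   (same running counts as A)
def pvB_updateCounts (f : PySem.Dict Int Int) (b : List Int) : PySem.Dict Int Int :=
  b.foldl (fun f x => f.insert x (f.getD x 0 + 1)) f

-- for x in keys: acc += f[x]; if a is None and acc > lo: a = x; if acc > hi: append & break
-- (a.getD 0 is only read at the break, where a has been set — the Python never adds None)
def pvB_medianScan (f : PySem.Dict Int Int) (n lo hi : Int) (acc : Int) (a : Option Int) :
    List Int → Option String
  | [] => none
  | x :: ks =>
    let c := f.getD x 0
    let acc2 := acc + c
    let a2 := if a = none ∧ acc2 > lo then some x else a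
    if acc2 > hi then
      some (if PySem.Int.mod n 2 = 1 then PySem.Int.toStr x
            else PySem.Int.toStr (PySem.Int.floordiv (a2.getD 0 + x) 2))
    else pvB_medianScan f n lo hi acc2 a2 ks

-- one iteration of B's outer loop
def pvB_batch (t : Int) (f : PySem.Dict Int Int) (res : List String) (b : List Int) :
    PySem.Dict Int Int × List String :=
  let f := pvB_updateCounts f b
  let keys := PySem.List.sorted (f.keys.filter (fun x => decide (f.getD x 0 ≤ t))) (fun x => x) false
  let n := keys.foldl (fun s x => s + f.getD x 0) 0
  if n = 0 then (f, res ++ ["NA"])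
  else
    let lo := PySem.Int.floordiv (n - 1) 2
    let hi := PySem.Int.floordiv n 2
    match pvB_medianScan f n lo hi 0 none keys with
    | none => (f, res)
    | some s => (f, res ++ [s])

def solve_grd015_alt (k : Int) (t : Int) (batches : List (List Int)) : String :=
  let st := batches.foldl (fun st b => pvB_batch t st.1 st.2 b) (PySem.Dict.empty, [])
  PySem.Str.join " " st.2

-- ===== PRECONDITION & SPEC =====
def Spec_solve_grd015 (k : Int) (t : Int) (batches : List (List Int)) (out : String) : Prop := out = solve_grd015_alt k t batches
instance (k : Int) (t : Int) (batches : List (List Int)) (out : String) : Decidable (Spec_solve_grd015 k t batches out) := by unfold Spec_solve_grd015; infer_instance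

-- ===== CLAIM (what is proved, stated in full; the proofs are below) =====
def Claim_equal_solve_grd015 : Prop := ∀ (k : Int) (t : Int) (batches : List (List Int)), Dom_solve_grd015 k t batches → Spec_solve_grd015 k t batches (solve_grd015 k t batches)

-- ===== LEMMAS AND PROOFS =====

-- the two count-update helpers are the same function
theorem pv_upd_eq : pvA_updateCounts = pvB_updateCounts := rfl

-- invariants of the running dictionary
theorem pv_upd_nodup (b : List Int) (f : PySem.Dict Int Int) (h : f.keys.Nodup) :
    (pvB_updateCounts f b).keys.Nodup := by
  induction b generalizing f with
  | nil => exact h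
  | cons x xs ih => exact ih _ (PySem.Dict.nodup_keys_insert f x _ h)

theorem pv_upd_pos (b : List Int) (f : PySem.Dict Int Int) (h : ∀ x, 0 ≤ f.getD x 0) :
    ∀ x, 0 ≤ (pvB_updateCounts f b).getD x 0 := by
  induction b generalizing f with
  | nil => exact h
  | cons y ys ih =>
    refine ih _ (fun x => ?_)
    rw [PySem.Dict.getD_insert]
    split
    · have := h y; omega
    · exact h x

-- A's v-building fold as a flatMap over the filtered items
theorem pv_foldl_ite_flatMap {α β : Type} (p : α → Prop) [DecidablePred p] (g : α → List β)
    (l : List α) (acc : List β) :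
    l.foldl (fun acc x => if p x then acc ++ g x else acc) acc
      = acc ++ (l.filter (fun x => decide (p x))).flatMap g := by
  induction l generalizing acc with
  | nil => simp
  | cons x xs ih =>
    by_cases hx : p x <;> simp [hx, ih, List.append_assoc]

-- getD on a dict with nodup keys agrees with the stored item
theorem pv_getD_of_mem_items (f : PySem.Dict Int Int) {x c : Int}
    (h : (x, c) ∈ f.items) (hnd : f.keys.Nodup) : f.getD x 0 = c := by
  have := PySem.Dict.get?_of_mem_items f h hnd
  show (f.get? x).getD 0 = c
  rw [this]; rfl

-- a strictly increasing key list yields a weakly sorted flatMap of replicates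
theorem pv_pairwise_flatMap_replicate (cnt : Int → Int) (ks : List Int)
    (h : ks.Pairwise (· < ·)) :
    (ks.flatMap (fun x => List.replicate (cnt x).toNat x)).Pairwise (· ≤ ·) := by
  induction ks with
  | nil => simp
  | cons x xs ih =>
    rw [List.flatMap_cons, List.pairwise_append]
    refine ⟨?_, ih h.of_cons, ?_⟩
    · exact List.pairwise_replicate.mpr (Or.inr le_rfl)
    · intro a ha b hb
      have hax : a = x := (List.eq_of_mem_replicate ha)
      obtain ⟨y, hy, hby⟩ := List.mem_flatMap.mp hb
      have hby' : b = y := List.eq_of_mem_replicate hby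
      have := (List.pairwise_cons.mp h).1 y hy
      omega

-- the sorted eligible multiset is the flatMap of replicates over the sorted eligible keys
theorem pv_sorted_v_eq (f : PySem.Dict Int Int) (t : Int) (hnd : f.keys.Nodup) :
    PySem.List.sorted
        ((f.items.filter (fun p => decide (p.2 ≤ t))).flatMap (fun p => List.replicate p.2.toNat p.1))
        (fun x => x) false
      = (PySem.List.sorted (f.keys.filter (fun x => decide (f.getD x 0 ≤ t))) (fun x => x) false).flatMap
          (fun x => List.replicate (f.getD x 0).toNat x) := by
  have hkeys : f.keys = f.items.map Prod.fst := rfl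
  have hkf : f.keys.filter (fun x => decide (f.getD x 0 ≤ t))
      = (f.items.filter (fun p => decide (p.2 ≤ t))).map Prod.fst := by
    rw [hkeys, List.filter_map]
    congr 1
    refine List.filter_congr (fun p hp => ?_)
    have : f.getD p.1 0 = p.2 := pv_getD_of_mem_items f hp hnd
    simp [Function.comp, this]
  have hflat : (f.keys.filter (fun x => decide (f.getD x 0 ≤ t))).flatMap
        (fun x => List.replicate (f.getD x 0).toNat x)
      = (f.items.filter (fun p => decide (p.2 ≤ t))).flatMap (fun p => List.replicate p.2.toNat p.1) := by
    rw [hkf, List.flatMap_map]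
    refine List.flatMap_congr (fun p hp => ?_)
    have : f.getD p.1 0 = p.2 := pv_getD_of_mem_items f (List.mem_of_mem_filter hp) hnd
    rw [this]
  have hperm : ((PySem.List.sorted (f.keys.filter (fun x => decide (f.getD x 0 ≤ t))) (fun x => x) false).flatMap
        (fun x => List.replicate (f.getD x 0).toNat x)).Perm
      ((f.items.filter (fun p => decide (p.2 ≤ t))).flatMap (fun p => List.replicate p.2.toNat p.1)) := by
    rw [← hflat]
    exact List.Perm.flatMap (PySem.List.sorted_perm _ _ _) (fun a _ => List.Perm.refl _)
  have hlt : (PySem.List.sorted (f.keys.filter (fun x => decide (f.getD x 0 ≤ t))) (fun x => x) false).Pairwise (· < ·) := by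
    have hle := PySem.List.sorted_pairwise (f.keys.filter (fun x => decide (f.getD x 0 ≤ t))) (fun x => x)
    have hnd2 : (PySem.List.sorted (f.keys.filter (fun x => decide (f.getD x 0 ≤ t))) (fun x => x) false).Nodup :=
      (PySem.List.sorted_perm _ _ _).symm.nodup (hnd.filter _)
    exact (hle.and hnd2).imp (fun h => lt_of_le_of_ne h.1 h.2)
  exact PySem.List.sorted_id_eq_of_perm_of_pairwise _ _ hperm
    (pv_pairwise_flatMap_replicate (fun x => f.getD x 0) _ hlt)

-- indexing into a block of copies followed by the rest
theorem pv_getD_repl_app_lt (m j : Nat) (x : Int) (l : List Int) (h : j < m) :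
    (List.replicate m x ++ l).getD j 0 = x := by
  rw [List.getD_append _ _ _ j (by simpa using h)]
  simp [List.getD_eq_getElem?_getD, h]

theorem pv_getD_repl_app_ge (m j : Nat) (x : Int) (l : List Int) (h : m ≤ j) :
    (List.replicate m x ++ l).getD j 0 = l.getD (j - m) 0 := by
  simp [List.getD_eq_getElem?_getD,
    List.getElem?_append_right (show (List.replicate m x).length ≤ j by simpa using h)]

-- the break-scan returns the ranked elements of the grouped multiset
theorem pv_scan_spec (f : PySem.Dict Int Int) (n lo hi : Int) (ks : List Int) :
    ∀ (acc : Int) (a : Option Int),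
    (∀ x ∈ ks, 0 ≤ f.getD x 0) →
    hi < acc + (ks.map (fun x => f.getD x 0)).sum →
    acc ≤ hi → lo ≤ hi →
    (match a with | none => acc ≤ lo | some _ => lo < acc) →
    pvB_medianScan f n lo hi acc a ks
      = some (if PySem.Int.mod n 2 = 1 then
                PySem.Int.toStr ((ks.flatMap (fun x => List.replicate (f.getD x 0).toNat x)).getD (hi - acc).toNat 0)
              else
                PySem.Int.toStr (PySem.Int.floordiv
                  ((match a with
                    | none => (ks.flatMap (fun x => List.replicate (f.getD x 0).toNat x)).getD (lo - acc).toNat 0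
                    | some y => y)
                   + (ks.flatMap (fun x => List.replicate (f.getD x 0).toNat x)).getD (hi - acc).toNat 0) 2)) := by
  induction ks with
  | nil =>
    intro acc a hpos hbreak hacc hlohi ha
    simp only [List.map_nil, List.sum_nil, Int.add_zero] at hbreak
    exact absurd hacc (by omega)
  | cons x ks ih =>
    intro acc a hpos hbreak hacc hlohi ha
    have hc : 0 ≤ f.getD x 0 := hpos x (List.mem_cons_self)
    simp only [List.map_cons, List.sum_cons] at hbreak
    simp only [pvB_medianScan, List.flatMap_cons]
    by_cases hbr : acc + f.getD x 0 > hi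
    · have hH : (List.replicate (f.getD x 0).toNat x
          ++ ks.flatMap (fun x => List.replicate (f.getD x 0).toNat x)).getD (hi - acc).toNat 0 = x :=
        pv_getD_repl_app_lt _ _ _ _ (by omega)
      rw [if_pos hbr, hH]
      cases a with
      | some y =>
        have hlt : lo < acc := ha
        simp
      | none =>
        have hle : acc ≤ lo := ha
        have hL : (List.replicate (f.getD x 0).toNat x
            ++ ks.flatMap (fun x => List.replicate (f.getD x 0).toNat x)).getD (lo - acc).toNat 0 = x :=
          pv_getD_repl_app_lt _ _ _ _ (by omega)
        rw [hL]
        have ha2 : ((none : Option Int) = none ∧ acc + f.getD x 0 > lo) := ⟨rfl, by omega⟩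
        simp [ha2]
    · rw [if_neg hbr]
      have hacc2 : acc + f.getD x 0 ≤ hi := by omega
      have hH : (List.replicate (f.getD x 0).toNat x
          ++ ks.flatMap (fun x => List.replicate (f.getD x 0).toNat x)).getD (hi - acc).toNat 0
          = (ks.flatMap (fun x => List.replicate (f.getD x 0).toNat x)).getD (hi - (acc + f.getD x 0)).toNat 0 := by
        rw [pv_getD_repl_app_ge _ _ _ _ (by omega)]
        congr 1
        omega
      rw [hH]
      cases a with
      | some y =>
        have hlt : lo < acc := ha
        have := ih (acc + f.getD x 0) (some y) (fun z hz => hpos z (List.mem_cons_of_mem x hz))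
          (by omega) hacc2 hlohi (by omega)
        simpa using this
      | none =>
        have hle : acc ≤ lo := ha
        by_cases hlo : acc + f.getD x 0 > lo
        · have hL : (List.replicate (f.getD x 0).toNat x
              ++ ks.flatMap (fun x => List.replicate (f.getD x 0).toNat x)).getD (lo - acc).toNat 0 = x :=
            pv_getD_repl_app_lt _ _ _ _ (by omega)
          rw [hL]
          have := ih (acc + f.getD x 0) (some x) (fun z hz => hpos z (List.mem_cons_of_mem x hz))
            (by omega) hacc2 hlohi (by omega)
          have ha2 : ((none : Option Int) = none ∧ acc + f.getD x 0 > lo) := ⟨rfl, hlo⟩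
          simp only [ha2, if_pos, and_self]
          simpa using this
        · have hL : (List.replicate (f.getD x 0).toNat x
              ++ ks.flatMap (fun x => List.replicate (f.getD x 0).toNat x)).getD (lo - acc).toNat 0
              = (ks.flatMap (fun x => List.replicate (f.getD x 0).toNat x)).getD (lo - (acc + f.getD x 0)).toNat 0 := by
            rw [pv_getD_repl_app_ge _ _ _ _ (by omega)]
            congr 1
            omega
          rw [hL]
          have := ih (acc + f.getD x 0) none (fun z hz => hpos z (List.mem_cons_of_mem x hz))
            (by omega) hacc2 hlohi (by omega)
          simpa [hlo] using this

-- length of the grouped multiset is the sum of the (nonnegative) counts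
theorem pv_len_flatMap_repl (cnt : Int → Int) (ks : List Int) (h : ∀ x ∈ ks, 0 ≤ cnt x) :
    (((ks.flatMap (fun x => List.replicate (cnt x).toNat x)).length : Int)) = (ks.map cnt).sum := by
  induction ks with
  | nil => simp
  | cons x xs ih =>
    simp only [List.flatMap_cons, List.length_append, List.length_replicate, List.map_cons,
      List.sum_cons]
    push_cast
    rw [ih (fun z hz => h z (List.mem_cons_of_mem x hz)), Int.toNat_of_nonneg (h x List.mem_cons_self)]

-- per-batch equality under the invariants
theorem pv_batch_eq (t : Int) (f : PySem.Dict Int Int) (res : List String) (b : List Int)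
    (hnd : f.keys.Nodup) (hpos : ∀ x, 0 ≤ f.getD x 0) :
    pvA_batch t f res b = pvB_batch t f res b := by
  have hnd' : (pvB_updateCounts f b).keys.Nodup := pv_upd_nodup b f hnd
  have hpos' : ∀ x, 0 ≤ (pvB_updateCounts f b).getD x 0 := pv_upd_pos b f hpos
  unfold pvA_batch pvB_batch
  rw [pv_upd_eq]
  set F := pvB_updateCounts f b with hF
  simp only [pv_foldl_ite_flatMap (fun p : Int × Int => p.2 ≤ t)
    (fun p : Int × Int => List.replicate p.2.toNat p.1) F.items [], List.nil_append,
    PySem.List.foldl_add, Int.zero_add]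
  set keys := PySem.List.sorted (F.keys.filter (fun x => decide (F.getD x 0 ≤ t))) (fun x => x) false
    with hkeys
  set v := (F.items.filter (fun p => decide (p.2 ≤ t))).flatMap
    (fun p => List.replicate p.2.toNat p.1) with hv
  set G := keys.flatMap (fun x => List.replicate (F.getD x 0).toNat x) with hG
  have hsorted : PySem.List.sorted v (fun x => x) false = G := pv_sorted_v_eq F t hnd'
  have hn : ((G.length : Int)) = (keys.map (fun x => F.getD x 0)).sum :=
    pv_len_flatMap_repl (fun x => F.getD x 0) keys (fun x _ => hpos' x)
  have hlenv : v.length = G.length := by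
    rw [← hsorted]
    exact ((PySem.List.sorted_perm v _ false).length_eq).symm
  by_cases hvnil : v = []
  · have : (keys.map (fun x => F.getD x 0)).sum = 0 := by
      rw [← hn, hlenv.symm, hvnil]; rfl
    simp [hvnil, this]
  · have hpos_len : 0 < (G.length : Int) := by
      have hne : v.length ≠ 0 := fun h => hvnil (List.eq_nil_of_length_eq_zero h)
      omega
    rw [if_neg hvnil, hsorted, ← hn]
    set N := (G.length : Int) with hNdef
    have hN1 : 1 ≤ N := hpos_len
    have hed : PySem.Int.floordiv N 2 = N / 2 := PySem.Int.floordiv_eq_ediv_of_pos (by omega)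
    have hed2 : PySem.Int.floordiv (N - 1) 2 = (N - 1) / 2 := PySem.Int.floordiv_eq_ediv_of_pos (by omega)
    have hmod : PySem.Int.mod N 2 = N % 2 := PySem.Int.mod_eq_emod_of_pos (by omega)
    rw [if_neg (show ¬(N = 0) by omega)]
    have hscan := pv_scan_spec F N (PySem.Int.floordiv (N - 1) 2) (PySem.Int.floordiv N 2) keys 0 none
      (fun x _ => hpos' x)
      (by rw [← hn, hed]; omega)
      (by rw [hed]; omega)
      (by rw [hed, hed2]; omega)
      (by show (0 : Int) ≤ PySem.Int.floordiv (N - 1) 2; rw [hed2]; omega)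
    rw [hscan]
    have hpy : ∀ i : Int, 0 ≤ i → i < N → PySem.List.pyGetD G i 0 = G.getD i.toNat 0 := by
      intro i h0 h1
      rw [PySem.List.pyGetD_eq_getElem G 0 h0 (by exact_mod_cast h1)]
      exact (List.getD_eq_getElem G 0 _).symm
    by_cases hodd : PySem.Int.mod N 2 = 1
    · simp only [hodd, if_pos, Int.sub_zero]
      rw [hpy (PySem.Int.floordiv N 2) (by rw [hed]; omega) (by rw [hed]; omega)]
    · have heven : N % 2 = 0 := by rw [hmod] at hodd; omega
      have hN2 : 2 ≤ N := by omega
      have hloeq : PySem.Int.floordiv N 2 - 1 = PySem.Int.floordiv (N - 1) 2 := by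
        rw [hed, hed2]; omega
      rw [if_neg hodd, if_neg hodd, Int.sub_zero, Int.sub_zero,
        hpy (PySem.Int.floordiv N 2 - 1) (by rw [hed]; omega) (by rw [hed]; omega),
        hpy (PySem.Int.floordiv N 2) (by rw [hed]; omega) (by rw [hed]; omega), hloeq]

theorem pvB_batch_fst (t : Int) (f : PySem.Dict Int Int) (res : List String) (b : List Int) :
    (pvB_batch t f res b).1 = pvB_updateCounts f b := by
  unfold pvB_batch
  simp only []
  split
  · rfl
  · split <;> rfl

-- ===== VERDICT (by name: the statement is the Claim_ definition above) =====
theorem solve_grd015_spec : Claim_equal_solve_grd015 := by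
  intro k t batches _
  unfold Spec_solve_grd015 solve_grd015 solve_grd015_alt
  suffices h : ∀ (bs : List (List Int)) (f : PySem.Dict Int Int) (res : List String),
      f.keys.Nodup → (∀ x, 0 ≤ f.getD x 0) →
      bs.foldl (fun st b => pvA_batch t st.1 st.2 b) (f, res)
        = bs.foldl (fun st b => pvB_batch t st.1 st.2 b) (f, res) by
    rw [h batches PySem.Dict.empty [] PySem.Dict.nodup_keys_empty
        (fun x => by rw [PySem.Dict.getD_empty])]
  intro bs
  induction bs with
  | nil => intro f res _ _; rfl
  | cons b bs ih =>
    intro f res hnd hpos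
    simp only [List.foldl_cons]
    rw [pv_batch_eq t f res b hnd hpos]
    have h1 : (pvB_batch t f res b).1 = pvB_updateCounts f b := pvB_batch_fst t f res b
    rcases hsplit : pvB_batch t f res b with ⟨f', res'⟩
    rw [hsplit] at h1
    simp only at h1
    subst h1
    exact ih _ _ (pv_upd_nodup b f hnd) (pv_upd_pos b f hpos)
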